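-- pv_equiv track=rewrite | github.com/1100jimjim/_alg | HW7/wolf_goat_cabbage.py | bfs
-- ===== SOURCE A (Python) =====
-- from collections import deque
--
-- LEFT = 'L'
--
-- RIGHT = 'R'
--
-- def is_safe(state):
--     """檢查該狀態是否安全（沒有人被吃）"""
--     M, W, G, C = state
--
--     if W == G and M != W:
--         return False
--
--     if G == C and M != G:
--         return False
--
--     return True
--
-- def move(state, passenger):
--     """
--     根據 passenger 產生下一個狀態:
--     passenger 可以是 None, 'W', 'G', 'C'
--     """
--     M, W, G, C = state
--     # 人移動方向：從 L 到 R 或 R 到 L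
--     new_side = RIGHT if M == LEFT else LEFT
--
--     M2, W2, G2, C2 = M, W, G, C
--     M2 = new_side
--
--     if passenger == 'W':
--         if W != M:
--             return None
--         W2 = new_side
--     elif passenger == 'G':
--         if G != M:
--             return None
--         G2 = new_side
--     elif passenger == 'C':
--         if C != M:
--             return None
--         C2 = new_side
--     elif passenger is None:
--         pass
--     else:
--         return None
--
--     next_state = (M2, W2, G2, C2)
--
--     if is_safe(next_state):
--         return next_state
--     else:
--         return None
--
-- def get_neighbors(state):
--     """從目前狀態產生所有合法的下一步狀態"""
--     neighbors = []
--     for passenger in [None, 'W', 'G', 'C']: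
--         ns = move(state, passenger)
--         if ns is not None:
--             neighbors.append((ns, passenger))
--     return neighbors
--
-- def bfs(start, goal):
--     """用 BFS 找出從 start 到 goal 的最短路徑"""
--     queue = deque()
--     queue.append(start)
--     visited = set()
--     visited.add(start)
--
--     parent = {start: (None, None)}  # state: (prev_state, passenger)
--
--     while queue:
--         current = queue.popleft()
--         if current == goal:
--
--             path = []
--             s = current
--             while s is not None:
--                 prev, passenger = parent[s]
--                 path.append((s, passenger))
--                 s = prev
--             path.reverse()
--             return path
--
--         for ns, passenger in get_neighbors(current):
--             if ns not in visited:
--                 visited.add(ns)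
--                 parent[ns] = (current, passenger)
--                 queue.append(ns)
--
--     return None
-- ===== SOURCE B (Python) =====
-- from collections import deque
--
-- LEFT = 'L'
--
-- RIGHT = 'R'
--
-- def is_safe(state):
--     M, W, G, C = state
--     if W == G and M != W:
--         return False
--     if G == C and M != G:
--         return False
--     return True
--
-- def move(state, passenger):
--     M, W, G, C = state
--     new_side = RIGHT if M == LEFT else LEFT
--     M2, W2, G2, C2 = M, W, G, C
--     M2 = new_side
--     if passenger == 'W':
--         if W != M:
--             return None
--         W2 = new_side
--     elif passenger == 'G':
--         if G != M:
--             return None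
--         G2 = new_side
--     elif passenger == 'C':
--         if C != M:
--             return None
--         C2 = new_side
--     elif passenger is None:
--         pass
--     else:
--         return None
--     next_state = (M2, W2, G2, C2)
--     return next_state if is_safe(next_state) else None
--
-- def get_neighbors(state):
--     neighbors = []
--     for passenger in [None, 'W', 'G', 'C']:
--         ns = move(state, passenger)
--         if ns is not None:
--             neighbors.append((ns, passenger))
--     return neighbors
--
-- def bfs(start, goal):
--     """BFS carrying the whole path inside the queue: no parent map, no backtracking pass."""
--     queue = deque()
--     queue.append((start, [(start, None)]))
--     visited = set()
--     visited.add(start)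
--     while queue:
--         current, path = queue.popleft()
--         if current == goal:
--             return path
--         for ns, passenger in get_neighbors(current):
--             if ns not in visited:
--                 visited.add(ns)
--                 queue.append((ns, path + [(ns, passenger)]))
--     return None
-- ===== Notes on version B (the rewrite author's own statement) =====
-- stated objective: alternative
-- what changed: B removes A's parent-pointer dict and the backtrack-and-reverse reconstruction loop: the BFS queue carries (state, path-so-far) pairs and the stored path is returned directly when the goal is dequeued.
import Mathlib
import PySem

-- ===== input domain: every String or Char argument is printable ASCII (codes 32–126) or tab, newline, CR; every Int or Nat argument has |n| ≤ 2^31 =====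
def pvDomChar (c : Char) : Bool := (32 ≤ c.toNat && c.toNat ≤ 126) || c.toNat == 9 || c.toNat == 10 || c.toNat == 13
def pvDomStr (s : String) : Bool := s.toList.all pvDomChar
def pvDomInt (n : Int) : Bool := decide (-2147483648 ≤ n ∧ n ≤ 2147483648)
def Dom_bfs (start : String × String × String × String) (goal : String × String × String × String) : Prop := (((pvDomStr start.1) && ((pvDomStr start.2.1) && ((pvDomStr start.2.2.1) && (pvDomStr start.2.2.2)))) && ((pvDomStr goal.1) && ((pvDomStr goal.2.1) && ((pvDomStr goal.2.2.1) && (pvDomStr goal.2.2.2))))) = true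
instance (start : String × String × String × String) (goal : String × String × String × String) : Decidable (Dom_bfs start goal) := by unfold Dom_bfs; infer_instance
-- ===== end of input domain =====

-- B replaces A's parent-pointer map and backtracking reconstruction by carrying the whole
-- path inside the BFS queue (same traversal order, same visited set); objective: alternative.

-- ===== PORT A =====
-- helpers is_safe / move / get_neighbors (shared verbatim by both Python versions)
def pvIsSafe (state : String × String × String × String) : Bool :=
  let M := state.1; let W := state.2.1; let G := state.2.2.1; let C := state.2.2.2
  if W == G && M != W then false
  else if G == C && M != G then false
  else true

def pvMove (state : String × String × String × String) (passenger : Option String) :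
    Option (String × String × String × String) :=
  let M := state.1; let W := state.2.1; let G := state.2.2.1; let C := state.2.2.2
  let newSide := if M == "L" then "R" else "L"
  let upd : Option (String × String × String) :=
    if passenger == some "W" then (if W != M then none else some (newSide, G, C))
    else if passenger == some "G" then (if G != M then none else some (W, newSide, C))
    else if passenger == some "C" then (if C != M then none else some (W, G, newSide))
    else if passenger == none then some (W, G, C)
    else none
  match upd with
  | none => none
  | some (W2, G2, C2) =>
    let nextState := (newSide, W2, G2, C2)
    if pvIsSafe nextState then some nextState else none

def pvGetNeighbors (state : String × String × String × String) :
    List ((String × String × String × String) × Option String) :=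
  [none, some "W", some "G", some "C"].foldl (fun acc p =>
    match pvMove state p with
    | none => acc
    | some ns => acc ++ [(ns, p)]) []

-- A's path-reconstruction loop ('while s is not None: … parent[s] …'); fuel only makes it
-- total (it is called with fuel parent.size+1, which always suffices).
def pvRecon (parent : PySem.Dict (String × String × String × String)
      (Option (String × String × String × String) × Option String)) :
    Nat → Option (String × String × String × String) →
    List ((String × String × String × String) × Option String) →
    Option (List ((String × String × String × String) × Option String))
  | _, none, path => some path.reverse
  | 0, some _, _ => none
  | fuel + 1, some s, path =>
    match parent.get? s with
    | none => none
    | some pr => pvRecon parent fuel pr.1 (path ++ [(s, pr.2)])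

-- body of A's inner 'for ns, passenger in get_neighbors(current)' loop
def pvStepA (current : String × String × String × String)
    (acc : List (String × String × String × String) ×
           PySem.Set (String × String × String × String) ×
           PySem.Dict (String × String × String × String)
             (Option (String × String × String × String) × Option String))
    (nsp : (String × String × String × String) × Option String) :
    List (String × String × String × String) ×
    PySem.Set (String × String × String × String) ×
    PySem.Dict (String × String × String × String)
      (Option (String × String × String × String) × Option String) :=
  if PySem.Set.contains acc.2.1 nsp.1 then acc
  else (acc.1 ++ [nsp.1], PySem.Set.add acc.2.1 nsp.1,
        acc.2.2.insert nsp.1 (some current, nsp.2))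

-- A's main 'while queue' loop; fuel only makes it total (the reachable state space has at
-- most 81 states, so fuel 1000 is never exhausted).
def pvLoopA (goal : String × String × String × String) :
    Nat → List (String × String × String × String) →
    PySem.Set (String × String × String × String) →
    PySem.Dict (String × String × String × String)
      (Option (String × String × String × String) × Option String) →
    Option (List ((String × String × String × String) × Option String))
  | 0, _, _, _ => none
  | _ + 1, [], _, _ => none
  | fuel + 1, current :: queue, visited, parent =>
    if current == goal then pvRecon parent (parent.size + 1) (some current) []
    else
      let st := (pvGetNeighbors current).foldl (pvStepA current) (queue, visited, parent)
      pvLoopA goal fuel st.1 st.2.1 st.2.2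

def bfs (start : String × String × String × String) (goal : String × String × String × String) :
    Option (List ((String × String × String × String) × Option String)) :=
  pvLoopA goal 1000 [start] (PySem.Set.add PySem.Set.empty start)
    (PySem.Dict.empty.insert start (none, none))

-- ===== PORT B =====
-- body of B's inner loop: appends (state, extended path); no dict anywhere
def pvStepB (path : List ((String × String × String × String) × Option String))
    (acc : List ((String × String × String × String) ×
                 List ((String × String × String × String) × Option String)) ×
           PySem.Set (String × String × String × String))
    (nsp : (String × String × String × String) × Option String) :
    List ((String × String × String × String) ×
          List ((String × String × String × String) × Option String)) ×
    PySem.Set (String × String × String × String) :=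
  if PySem.Set.contains acc.2 nsp.1 then acc
  else (acc.1 ++ [(nsp.1, path ++ [nsp])], PySem.Set.add acc.2 nsp.1)

-- B's main loop: the queue holds (state, path-so-far); returns the stored path at the goal
def pvLoopB (goal : String × String × String × String) :
    Nat → List ((String × String × String × String) ×
                List ((String × String × String × String) × Option String)) →
    PySem.Set (String × String × String × String) →
    Option (List ((String × String × String × String) × Option String))
  | 0, _, _ => none
  | _ + 1, [], _ => none
  | fuel + 1, (current, path) :: queue, visited =>
    if current == goal then some path
    else
      let st := (pvGetNeighbors current).foldl (pvStepB path) (queue, visited)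
      pvLoopB goal fuel st.1 st.2

def bfs_alt (start : String × String × String × String) (goal : String × String × String × String) :
    Option (List ((String × String × String × String) × Option String)) :=
  pvLoopB goal 1000 [(start, [(start, none)])] (PySem.Set.add PySem.Set.empty start)

-- ===== PRECONDITION & SPEC =====
def Spec_bfs (start : String × String × String × String) (goal : String × String × String × String) (out : Option (List ((String × String × String × String) × Option String))) : Prop := out = bfs_alt start goal
instance (start : String × String × String × String) (goal : String × String × String × String) (out : Option (List ((String × String × String × String) × Option String))) : Decidable (Spec_bfs start goal out) := by unfold Spec_bfs; infer_instance

-- ===== CLAIM (what is proved, stated in full; the proofs are below) =====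
def Claim_equal_bfs : Prop := ∀ (start : String × String × String × String) (goal : String × String × String × String), Dom_bfs start goal → Spec_bfs start goal (bfs start goal)

-- ===== LEMMAS AND PROOFS =====

theorem recon_none (parent : PySem.Dict (String × String × String × String)
      (Option (String × String × String × String) × Option String)) (f : Nat)
    (acc : List ((String × String × String × String) × Option String)) :
    pvRecon parent f none acc = some acc.reverse := by
  cases f <;> rfl

theorem recon_succ (parent : PySem.Dict (String × String × String × String)
      (Option (String × String × String × String) × Option String)) (f : Nat)
    (s : String × String × String × String)
    (acc : List ((String × String × String × String) × Option String)) :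
    pvRecon parent (f + 1) (some s) acc =
      match parent.get? s with
      | none => none
      | some pr => pvRecon parent f pr.1 (acc ++ [(s, pr.2)]) := rfl

theorem recon_acc (parent : PySem.Dict (String × String × String × String)
      (Option (String × String × String × String) × Option String))
    (f : Nat) (s : Option (String × String × String × String))
    (acc : List ((String × String × String × String) × Option String)) :
    pvRecon parent f s acc = (pvRecon parent f s []).map (fun r => r ++ acc.reverse) := by
  induction f generalizing s acc with
  | zero =>
    cases s with
    | none => simp [recon_none]
    | some s => rfl
  | succ f ih =>
    cases s with
    | none => simp [recon_none]
    | some s =>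
      rw [recon_succ, recon_succ]
      cases h : parent.get? s with
      | none => rfl
      | some pr =>
        dsimp only
        rw [ih pr.1 (acc ++ [(s, pr.2)]), ih pr.1 ([] ++ [(s, pr.2)])]
        cases pvRecon parent f pr.1 [] <;> simp

theorem recon_insert (parent : PySem.Dict (String × String × String × String)
      (Option (String × String × String × String) × Option String))
    (k : String × String × String × String)
    (v : Option (String × String × String × String) × Option String)
    (hk : parent.contains k = false)
    (f f' : Nat) (hf : f ≤ f') (s : Option (String × String × String × String))
    (acc r : List ((String × String × String × String) × Option String))
    (h : pvRecon parent f s acc = some r) :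
    pvRecon (parent.insert k v) f' s acc = some r := by
  induction f generalizing s acc f' with
  | zero =>
    cases s with
    | none => rw [recon_none] at h; rw [recon_none]; exact h
    | some s => simp [pvRecon] at h
  | succ f ih =>
    cases s with
    | none => rw [recon_none] at h; rw [recon_none]; exact h
    | some s =>
      obtain ⟨f'', rfl⟩ : ∃ f'', f' = f'' + 1 := ⟨f' - 1, by omega⟩
      rw [recon_succ] at h
      rw [recon_succ]
      cases hg : parent.get? s with
      | none => rw [hg] at h; exact absurd h (by simp)
      | some pr =>
        rw [hg] at h
        have hne : s ≠ k := by
          intro he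
          rw [PySem.Dict.contains_eq_isSome_get?, ← he, hg] at hk
          simp at hk
        rw [PySem.Dict.get?_insert_of_ne _ _ hne, hg]
        exact ih f'' (by omega) pr.1 _ h

-- coupling invariant between A's (queue, visited, parent) and B's (queue-of-paths, visited)
def pvInv (qB : List ((String × String × String × String) ×
      List ((String × String × String × String) × Option String)))
    (visited : PySem.Set (String × String × String × String))
    (parent : PySem.Dict (String × String × String × String)
      (Option (String × String × String × String) × Option String)) : Prop :=
  (∀ sp ∈ qB, pvRecon parent (parent.size + 1) (some sp.1) [] = some sp.2) ∧
  (∀ k, parent.contains k = true → PySem.Set.contains visited k = true)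

theorem fold_corr (current : String × String × String × String)
    (path : List ((String × String × String × String) × Option String))
    (l : List ((String × String × String × String) × Option String)) :
    ∀ (qB : List ((String × String × String × String) ×
        List ((String × String × String × String) × Option String)))
      (visited : PySem.Set (String × String × String × String))
      (parent : PySem.Dict (String × String × String × String)
        (Option (String × String × String × String) × Option String)),
      pvInv qB visited parent →
      pvRecon parent (parent.size + 1) (some current) [] = some path →
      (l.foldl (pvStepA current) (qB.map Prod.fst, visited, parent)).1 =
        (l.foldl (pvStepB path) (qB, visited)).1.map Prod.fst ∧
      (l.foldl (pvStepA current) (qB.map Prod.fst, visited, parent)).2.1 =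
        (l.foldl (pvStepB path) (qB, visited)).2 ∧
      pvInv (l.foldl (pvStepB path) (qB, visited)).1
        (l.foldl (pvStepB path) (qB, visited)).2
        (l.foldl (pvStepA current) (qB.map Prod.fst, visited, parent)).2.2 := by
  induction l with
  | nil => intro qB visited parent hInv hcur; exact ⟨rfl, rfl, hInv⟩
  | cons nsp l ih =>
    intro qB visited parent hInv hcur
    simp only [List.foldl_cons, pvStepA, pvStepB]
    by_cases hv : PySem.Set.contains visited nsp.1 = true
    · simp only [hv, if_true]
      exact ih qB visited parent hInv hcur
    · simp only [hv, if_false, Bool.false_eq_true]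
      have hfresh : parent.contains nsp.1 = false := by
        cases hc : parent.contains nsp.1 with
        | false => rfl
        | true => exact absurd (hInv.2 _ hc) hv
      have hsize : (parent.insert nsp.1 (some current, nsp.2)).size = parent.size + 1 := by
        simp [PySem.Dict.size_insert, hfresh]
      have hInv' : pvInv (qB ++ [(nsp.1, path ++ [nsp])])
          (PySem.Set.add visited nsp.1) (parent.insert nsp.1 (some current, nsp.2)) := by
        constructor
        · intro sp hsp
          rcases List.mem_append.mp hsp with h | h
          · rw [hsize]
            exact recon_insert parent nsp.1 _ hfresh (parent.size + 1) (parent.size + 2)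
              (by omega) _ _ _ (hInv.1 sp h)
          · simp only [List.mem_singleton] at h
            subst h
            rw [hsize, recon_succ, PySem.Dict.get?_insert_self]
            dsimp only
            have hc : pvRecon (parent.insert nsp.1 (some current, nsp.2))
                (parent.size + 1) (some current) [] = some path :=
              recon_insert parent nsp.1 _ hfresh (parent.size + 1) (parent.size + 1)
                le_rfl _ _ _ hcur
            rw [recon_acc, hc]
            simp
        · intro k hk
          rw [PySem.Dict.contains_insert] at hk
          have hmem : k ∈ PySem.Set.add visited nsp.1 := by
            rcases Bool.or_eq_true_iff.mp hk with h | h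
            · have : k = nsp.1 := eq_of_beq h
              subst this
              simp [PySem.Set.mem_add]
            · have hm : k ∈ visited := by
                simpa [PySem.Set.contains, List.contains_iff_mem] using hInv.2 k h
              simp [PySem.Set.mem_add]
              exact Or.inl hm
          simpa [PySem.Set.contains, List.contains_iff_mem] using hmem
      have := ih (qB ++ [(nsp.1, path ++ [nsp])]) (PySem.Set.add visited nsp.1)
        (parent.insert nsp.1 (some current, nsp.2)) hInv'
        (by
          rw [hsize]
          exact recon_insert parent nsp.1 _ hfresh (parent.size + 1) (parent.size + 2)
            (by omega) _ _ _ hcur)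
      simpa using this

theorem loop_eq (goal : String × String × String × String) (fuel : Nat) :
    ∀ (qB : List ((String × String × String × String) ×
        List ((String × String × String × String) × Option String)))
      (visited : PySem.Set (String × String × String × String))
      (parent : PySem.Dict (String × String × String × String)
        (Option (String × String × String × String) × Option String)),
      pvInv qB visited parent →
      pvLoopA goal fuel (qB.map Prod.fst) visited parent = pvLoopB goal fuel qB visited := by
  induction fuel with
  | zero => intro qB visited parent _; rfl
  | succ fuel ih =>
    intro qB visited parent hInv
    cases qB with
    | nil => rfl
    | cons hd qB' =>
      obtain ⟨current, path⟩ := hd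
      simp only [List.map_cons, pvLoopA, pvLoopB]
      by_cases hg : (current == goal) = true
      · simp only [hg, if_true]
        exact hInv.1 (current, path) List.mem_cons_self
      · simp only [hg, if_false, Bool.false_eq_true]
        have hcur := hInv.1 (current, path) List.mem_cons_self
        have hInv' : pvInv qB' visited parent :=
          ⟨fun sp hsp => hInv.1 sp (List.mem_cons_of_mem _ hsp), hInv.2⟩
        obtain ⟨h1, h2, h3⟩ :=
          fold_corr current path (pvGetNeighbors current) qB' visited parent hInv' hcur
        rw [h1, h2]
        exact ih _ _ _ h3

-- ===== VERDICT (by name: the statement is the Claim_ definition above) =====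
theorem bfs_spec : Claim_equal_bfs := by
  intro start goal _
  show bfs start goal = bfs_alt start goal
  unfold bfs bfs_alt
  have h : ([(start, [(start, none)])] :
      List ((String × String × String × String) ×
        List ((String × String × String × String) × Option String))).map Prod.fst = [start] := rfl
  rw [← h]
  apply loop_eq
  constructor
  · intro sp hsp
    simp only [List.mem_singleton] at hsp
    subst hsp
    rw [show (PySem.Dict.empty.insert start
        ((none : Option (String × String × String × String)), (none : Option String))).size + 1 = 2
      from by simp [PySem.Dict.size_insert]]
    rw [recon_succ, PySem.Dict.get?_insert_self]
    rfl
  · intro k hk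
    rw [PySem.Dict.contains_insert] at hk
    have : k = start := by
      rcases Bool.or_eq_true_iff.mp hk with h | h
      · exact eq_of_beq h
      · rw [PySem.Dict.contains_empty] at h
        exact absurd h (by simp)
    subst this
    simp [PySem.Set.contains, PySem.Set.add]
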